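-- pv_equiv track=rewrite | github.com/MrBrantCode/unitest_baseline | mut_generate/mist_train_cf/cf_3047/solution.py | remove_duplicates_and_sort
-- ===== SOURCE A (Python) =====
-- def remove_duplicates_and_sort(nums):
--     """
--     Removes non-prime numbers and duplicates from a list of integers,
--     and returns a sorted list in ascending order.
--
--     Args:
--         nums (list): A list of integers.
--
--     Returns:
--         list: A sorted list of unique prime numbers.
--     """
--     def is_prime(n):
--         """Checks if a number is prime."""
--         if n < 2:
--             return False
--         for i in range(2, int(n**0.5) + 1):
--             if n % i == 0:
--                 return False
--         return True
--
--     # Filter out non-prime numbers and duplicates, and sort the list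
--     return sorted(set(num for num in nums if is_prime(num)))
-- ===== SOURCE B (Python) =====
-- def remove_duplicates_and_sort(nums):
--     """
--     Removes non-prime numbers and duplicates from a list of integers,
--     and returns a sorted list in ascending order.
--
--     Re-implementation: precompute the primes up to isqrt(max(nums)) with a
--     sieve of Eratosthenes once, then test each distinct value by trial
--     division against that short prime list only.
--     """
--     if not nums:
--         return []
--     m = max(nums)
--     if m < 2:
--         return []
--     # limit = isqrt(m) + 1, computed without floats
--     limit = 1
--     while limit * limit <= m:
--         limit += 1
--     sieve = [True] * limit
--     sieve[0] = False
--     sieve[1] = False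
--     for i in range(2, limit):
--         for j in range(i * i, limit, i):
--             sieve[j] = False
--     primes = [i for i in range(2, limit) if sieve[i]]
--
--     def is_prime_small(x):
--         if x < 2:
--             return False
--         for p in primes:
--             if p * p > x:
--                 break
--             if x % p == 0:
--                 return False
--         return True
--
--     return sorted(x for x in set(nums) if is_prime_small(x))
-- ===== Notes on version B (the rewrite author's own statement) =====
-- stated objective: faster
-- what changed: Instead of trial-dividing every number by all integers up to its square root, B builds one Sieve of Eratosthenes up to isqrt(max(nums)) and tests each distinct value by dividing only by the precomputed primes (stopping at p*p > x).
import Mathlib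
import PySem

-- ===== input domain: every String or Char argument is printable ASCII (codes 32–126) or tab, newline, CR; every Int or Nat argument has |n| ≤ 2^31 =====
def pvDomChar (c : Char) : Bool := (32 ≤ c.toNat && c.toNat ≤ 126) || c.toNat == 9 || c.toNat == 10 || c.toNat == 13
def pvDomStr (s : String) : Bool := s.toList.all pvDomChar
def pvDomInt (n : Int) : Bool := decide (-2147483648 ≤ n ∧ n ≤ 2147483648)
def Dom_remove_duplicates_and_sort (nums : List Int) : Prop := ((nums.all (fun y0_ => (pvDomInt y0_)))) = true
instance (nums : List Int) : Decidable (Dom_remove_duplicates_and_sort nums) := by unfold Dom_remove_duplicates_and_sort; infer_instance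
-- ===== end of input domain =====

-- B replaces A's per-number trial division by every integer up to sqrt(n) with one
-- Sieve of Eratosthenes up to isqrt(max(nums)) and trial division by the sieved primes only.

-- ===== PORT A =====
-- A's is_prime: trial division by every i in range(2, int(n**0.5)+1).
-- int(n**0.5) is ported as Nat.sqrt n.toNat: exact for 0 ≤ n ≤ 2^31 (the float square root
-- yields the exact integer square root after int() on this range); the branch is only reached for n ≥ 2.
def pvIsPrime (n : Int) : Bool :=
  if n < 2 then false
  else (PySem.List.pyRange 2 ((Nat.sqrt n.toNat : Int) + 1) 1).all
         (fun i => !(PySem.Int.mod n i == 0))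

def remove_duplicates_and_sort (nums : List Int) : List Int :=
  PySem.List.sorted (PySem.Set.ofList (nums.filter pvIsPrime)) (fun x => x) false

-- ===== PORT B =====
-- limit = 1; while limit*limit <= m: limit += 1
def pvFindLimit (m limit : Int) : Int :=
  if limit * limit ≤ m then pvFindLimit m (limit + 1) else limit
termination_by (m + 2 - limit).toNat
decreasing_by
  rename_i h
  have h2 : 2 * limit ≤ m + 1 := by nlinarith [sq_nonneg (limit - 1)]
  have h0 : 0 ≤ m := le_trans (mul_self_nonneg limit) h
  omega

-- sieve[j] = v / sieve[j] reads; the sieve is a Python list of booleans, held as an Array.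
-- Exact for 0 ≤ j < len(s): the only indices Source B's sieve code ever uses (0, 1 and
-- range(i*i, limit, i) with limit = len(s)), so no negative-index wraparound is reachable.
def pvSetA (s : Array Bool) (j : Int) (v : Bool) : Array Bool := s.setIfInBounds j.toNat v
def pvGetA (s : Array Bool) (j : Int) : Bool := s.getD j.toNat false

-- for j in range(i*i, limit, i): sieve[j] = False
def pvMark (s : Array Bool) (limit i : Int) : Array Bool :=
  (PySem.List.pyRange (i * i) limit i).foldl (fun s j => pvSetA s j false) s

-- for p in primes: if p*p > x: break; if x % p == 0: return False -- then: return True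
def pvCheckPrimes (x : Int) : List Int → Bool
  | [] => true
  | p :: ps => if x < p * p then true
               else if PySem.Int.mod x p == 0 then false
               else pvCheckPrimes x ps

def pvIsPrimeSmall (primes : List Int) (x : Int) : Bool :=
  if x < 2 then false else pvCheckPrimes x primes

def remove_duplicates_and_sort_alt (nums : List Int) : List Int :=
  -- max? nums = none exactly on the empty list, where Source B returns [] up front
  match PySem.List.max? nums (fun x => x) with
  | none => []
  | some m =>
    if m < 2 then []
    else
      let limit := pvFindLimit m 1
      let sieve0 := pvSetA (pvSetA (Array.replicate limit.toNat true) 0 false) 1 false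
      let sieve := (PySem.List.pyRange 2 limit 1).foldl (fun s i => pvMark s limit i) sieve0
      let primes := (PySem.List.pyRange 2 limit 1).filter (fun i => pvGetA sieve i)
      PySem.List.sorted ((PySem.Set.ofList nums).filter (fun x => pvIsPrimeSmall primes x)) (fun x => x) false

-- ===== PRECONDITION & SPEC =====
def Spec_remove_duplicates_and_sort (nums : List Int) (out : List Int) : Prop := out = remove_duplicates_and_sort_alt nums
instance (nums : List Int) (out : List Int) : Decidable (Spec_remove_duplicates_and_sort nums out) := by unfold Spec_remove_duplicates_and_sort; infer_instance

-- ===== CLAIM (what is proved, stated in full; the proofs are below) =====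
def Claim_equal_remove_duplicates_and_sort : Prop := ∀ (nums : List Int), Dom_remove_duplicates_and_sort nums → Spec_remove_duplicates_and_sort nums (remove_duplicates_and_sort nums)

-- ===== LEMMAS AND PROOFS =====

-- A's trial division decides primality.
theorem pvIsPrime_iff (n : Int) : pvIsPrime n = true ↔ 2 ≤ n ∧ Nat.Prime n.toNat := by
  unfold pvIsPrime
  by_cases h : n < 2
  · simp only [h, if_true, Bool.false_eq_true, false_iff, not_and]
    omega
  · rw [if_neg h]
    rw [not_lt] at h
    rw [List.all_eq_true]
    have hn : n = (n.toNat : Int) := by omega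
    constructor
    · intro hall
      refine ⟨h, Nat.prime_def_le_sqrt.2 ⟨by omega, fun mN h2 hle hd => ?_⟩⟩
      have hm := hall (mN : Int)
        (PySem.List.mem_pyRange_one.2 ⟨by exact_mod_cast h2, by omega⟩)
      simp only [Bool.not_eq_eq_eq_not, Bool.not_true, beq_eq_false_iff_ne, ne_eq] at hm
      exact hm ((PySem.Int.mod_eq_zero_iff_dvd n mN).2 (by rw [hn]; exact_mod_cast hd))
    · rintro ⟨-, hp⟩ i hi
      obtain ⟨h2i, hlt⟩ := PySem.List.mem_pyRange_one.1 hi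
      simp only [Bool.not_eq_eq_eq_not, Bool.not_true, beq_eq_false_iff_ne, ne_eq]
      intro hmod
      have hdvd : i ∣ n := (PySem.Int.mod_eq_zero_iff_dvd n i).1 hmod
      have hiN : i = (i.toNat : Int) := by omega
      have hdN : i.toNat ∣ n.toNat := by
        rw [hiN] at hdvd; rw [hn] at hdvd; exact_mod_cast hdvd
      exact (Nat.prime_def_le_sqrt.1 hp).2 i.toNat (by omega) (by omega) hdN

-- pvFindLimit m limit is the least l ≥ limit with l*l > m (Source B's while loop).
theorem pvFindLimit_spec (m : Int) (limit : Int) (h1 : 1 ≤ limit)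
    (h2 : (limit - 1) * (limit - 1) ≤ m) :
    limit ≤ pvFindLimit m limit ∧ m < pvFindLimit m limit * pvFindLimit m limit ∧
      (pvFindLimit m limit - 1) * (pvFindLimit m limit - 1) ≤ m := by
  induction limit using pvFindLimit.induct m with
  | case1 limit h ih =>
    rw [pvFindLimit, if_pos h]
    have := ih (by omega) (by simpa using h)
    exact ⟨by omega, this.2.1, this.2.2⟩
  | case2 limit h =>
    rw [pvFindLimit, if_neg h]
    exact ⟨le_refl _, by omega, h2⟩

-- one assignment sieve[j] := False, seen through getD
theorem pvSetA_getD (s : Array Bool) (j : Int) (hj : 0 ≤ j) (q : Nat) :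
    (pvSetA s j false).getD q false
      = if (q : Int) = j ∧ q < s.size then false else s.getD q false := by
  unfold pvSetA
  have hq : (q : Int) = j ↔ q = j.toNat := by omega
  rw [Array.getD_eq_getD_getElem?, Array.getD_eq_getD_getElem?]
  simp only [Array.getElem?_setIfInBounds, hq]
  by_cases h1 : j.toNat = q
  · subst h1
    by_cases h2 : j.toNat < s.size <;> simp [h2]
  · simp [h1]
    intro _
    exact Or.inl (fun h => h1 h.symm)

theorem foldl_pvSetA_size (L : List Int) (s : Array Bool) :
    (L.foldl (fun s j => pvSetA s j false) s).size = s.size := by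
  induction L generalizing s with
  | nil => rfl
  | cons j L ih =>
    rw [List.foldl_cons, ih]
    exact Array.size_setIfInBounds

theorem foldl_pvSetA_getD (L : List Int) (s : Array Bool) (hL : ∀ j ∈ L, 0 ≤ j) (q : Nat) :
    (L.foldl (fun s j => pvSetA s j false) s).getD q false
      = if (q : Int) ∈ L ∧ q < s.size then false else s.getD q false := by
  induction L generalizing s with
  | nil => simp
  | cons j L ih =>
    have hj : 0 ≤ j := hL j (List.mem_cons_self ..)
    simp only [List.foldl_cons]
    rw [ih _ (fun x hx => hL x (List.mem_cons_of_mem _ hx))]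
    have hsz : (pvSetA s j false).size = s.size := Array.size_setIfInBounds
    rw [hsz, pvSetA_getD s j hj q]
    by_cases h1 : (q : Int) ∈ L <;> by_cases h2 : q < s.size <;>
      by_cases h3 : (q : Int) = j <;> simp [h1, h2, h3, List.mem_cons]

theorem pvMark_size (s : Array Bool) (limit i : Int) : (pvMark s limit i).size = s.size :=
  foldl_pvSetA_size _ s

theorem pvMark_getD (s : Array Bool) (limit i : Int) (hi : 0 < i) (q : Nat) :
    (pvMark s limit i).getD q false
      = if (q : Int) ∈ PySem.List.pyRange (i * i) limit i ∧ q < s.size then false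
        else s.getD q false := by
  refine foldl_pvSetA_getD _ s (fun j hj => ?_) q
  have := (PySem.List.mem_pyRange_iff_of_pos hi j).1 hj
  nlinarith [this.1, mul_self_nonneg i]

theorem sieve_foldl_getD (I : List Int) (s : Array Bool) (hI : ∀ i ∈ I, 0 < i) (limit : Int) (q : Nat) :
    (I.foldl (fun s i => pvMark s limit i) s).getD q false
      = if (∃ i ∈ I, (q : Int) ∈ PySem.List.pyRange (i * i) limit i) ∧ q < s.size then false
        else s.getD q false := by
  induction I generalizing s with
  | nil => simp
  | cons i I ih =>
    have hi : 0 < i := hI i (List.mem_cons_self ..)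
    simp only [List.foldl_cons]
    rw [ih _ (fun x hx => hI x (List.mem_cons_of_mem _ hx)), pvMark_size,
      pvMark_getD s limit i hi q]
    by_cases h1 : ∃ j ∈ I, (q : Int) ∈ PySem.List.pyRange (j * j) limit j <;>
      by_cases h2 : q < s.size <;>
      by_cases h3 : (q : Int) ∈ PySem.List.pyRange (i * i) limit i <;>
      simp [h1, h2, h3, List.mem_cons]

-- q is crossed out by some pass of the sieve loop iff q is composite
theorem marked_iff (limit : Int) (q : Nat) (hq : 2 ≤ q) (hlt : (q : Int) < limit) :
    (∃ i ∈ PySem.List.pyRange 2 limit 1, (q : Int) ∈ PySem.List.pyRange (i * i) limit i)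
      ↔ ¬ Nat.Prime q := by
  constructor
  · rintro ⟨i, hiI, hiq⟩ hp
    obtain ⟨h2i, _⟩ := PySem.List.mem_pyRange_one.1 hiI
    obtain ⟨hsq, _, hdv⟩ := (PySem.List.mem_pyRange_iff_of_pos (by omega) _).1 hiq
    have hdq : i ∣ (q : Int) := by
      have : (q : Int) = ((q : Int) - i * i) + i * i := by ring
      rw [this]
      exact dvd_add hdv (Dvd.intro i rfl)
    have hiN : i = (i.toNat : Int) := by omega
    have hdN : i.toNat ∣ q := by rw [hiN] at hdq; exact_mod_cast hdq
    rcases hp.eq_one_or_self_of_dvd i.toNat hdN with h1 | h1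
    · omega
    · have : (q : Int) * (q : Int) ≤ (q : Int) := by
        rw [hiN, h1] at hsq; exact_mod_cast hsq
      nlinarith [this]
  · intro hp
    have hq1 : q ≠ 1 := by omega
    have hpr := Nat.minFac_prime hq1
    have hd := Nat.minFac_dvd q
    have hsq : q.minFac ^ 2 ≤ q := Nat.minFac_sq_le_self (by omega) hp
    have h2p : 2 ≤ q.minFac := hpr.two_le
    refine ⟨(q.minFac : Int), PySem.List.mem_pyRange_one.2 ⟨by exact_mod_cast h2p, ?_⟩,
      (PySem.List.mem_pyRange_iff_of_pos (by exact_mod_cast Nat.lt_of_lt_of_le Nat.zero_lt_two h2p) _).2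
        ⟨?_, hlt, ?_⟩⟩
    · have h1 : q.minFac ≤ q := by nlinarith [hsq, h2p]
      have : (q.minFac : Int) ≤ (q : Int) := by exact_mod_cast h1
      omega
    · have h1 : q.minFac * q.minFac ≤ q := by nlinarith [hsq]
      exact_mod_cast h1
    · refine dvd_sub ?_ (Dvd.intro _ rfl)
      exact_mod_cast hd

-- the finished sieve read at q < limit is the primality of q
theorem sieve_getD_iff (limit : Int) (hl2 : 2 ≤ limit) (q : Nat) (hql : (q : Int) < limit) :
    (((PySem.List.pyRange 2 limit 1).foldl (fun s i => pvMark s limit i)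
        (pvSetA (pvSetA (Array.replicate limit.toNat true) 0 false) 1 false)).getD q false)
      = true ↔ 2 ≤ q ∧ Nat.Prime q := by
  have hlen : (pvSetA (pvSetA (Array.replicate limit.toNat true) 0 false) 1 false).size
      = limit.toNat := by
    rw [pvSetA, pvSetA, Array.size_setIfInBounds, Array.size_setIfInBounds, Array.size_replicate]
  rw [sieve_foldl_getD _ _ (fun i hi => by have := PySem.List.mem_pyRange_one.1 hi; omega) limit q,
    hlen]
  have hqlen : q < limit.toNat := by omega
  have hs0 : (pvSetA (pvSetA (Array.replicate limit.toNat true) 0 false) 1 false).getD q false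
      = if 2 ≤ q then true else false := by
    rw [pvSetA_getD _ 1 (by omega) q]
    have h1sz : (pvSetA (Array.replicate limit.toNat true) 0 false).size = limit.toNat := by
      rw [pvSetA, Array.size_setIfInBounds, Array.size_replicate]
    rw [h1sz, pvSetA_getD _ 0 (by omega) q, Array.size_replicate,
      Array.getD_eq_getD_getElem?, Array.getElem?_replicate, if_pos hqlen]
    by_cases h0 : q = 0
    · simp [h0]
      omega
    · by_cases h1 : q = 1
      · simp [h1]
        omega
      · have : ¬((q : Int) = 1 ∧ q < limit.toNat) := by omega
        have h0' : ¬((q : Int) = 0 ∧ q < limit.toNat) := by omega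
        rw [if_neg this, if_neg h0', if_pos (by omega)]
        rfl
  by_cases h2 : 2 ≤ q
  · by_cases hm : ∃ i ∈ PySem.List.pyRange 2 limit 1, (q : Int) ∈ PySem.List.pyRange (i * i) limit i
    · rw [if_pos ⟨hm, hqlen⟩]
      simp only [Bool.false_eq_true, false_iff, not_and]
      intro _
      exact (marked_iff limit q h2 hql).1 hm
    · rw [if_neg (fun h => hm h.1), hs0, if_pos h2]
      simp only [true_iff]
      refine ⟨h2, ?_⟩
      by_contra hnp
      exact hm ((marked_iff limit q h2 hql).2 hnp)
  · have hnm : ¬ ∃ i ∈ PySem.List.pyRange 2 limit 1, (q : Int) ∈ PySem.List.pyRange (i * i) limit i := by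
      rintro ⟨i, hiI, hiq⟩
      have h2i := (PySem.List.mem_pyRange_one.1 hiI).1
      have := ((PySem.List.mem_pyRange_iff_of_pos (by omega) _).1 hiq).1
      nlinarith
    rw [if_neg (fun h => hnm h.1), hs0, if_neg h2]
    simp only [Bool.false_eq_true, false_iff, not_and]
    intro h
    exact absurd h h2

theorem pyRange_one_pairwise_lt (a b : Int) :
    (PySem.List.pyRange a b 1).Pairwise (· < ·) := by
  simp only [PySem.List.pyRange]
  norm_num
  refine List.Pairwise.map _ (fun k k' h => ?_) List.pairwise_lt_range
  omega

theorem pvCheckPrimes_iff (x : Int) (P : List Int) (h2 : ∀ p ∈ P, 2 ≤ p)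
    (hs : P.Pairwise (· < ·)) :
    pvCheckPrimes x P = true ↔ ∀ p ∈ P, p * p ≤ x → ¬ (p ∣ x) := by
  induction P with
  | nil => simp [pvCheckPrimes]
  | cons p ps ih =>
    have hp2 : 2 ≤ p := h2 p (List.mem_cons_self ..)
    have hlt : ∀ p' ∈ ps, p < p' := (List.pairwise_cons.1 hs).1
    rw [pvCheckPrimes]
    by_cases hbr : x < p * p
    · rw [if_pos hbr]
      simp only [true_iff]
      intro p' hp' hle
      rcases List.mem_cons.1 hp' with h | h
      · subst h; omega
      · exfalso
        have := hlt p' h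
        nlinarith [h2 p' (List.mem_cons_of_mem _ h)]
    · rw [if_neg hbr]
      by_cases hdvd : PySem.Int.mod x p = 0
      · rw [hdvd]
        simp only [beq_self_eq_true, if_true, Bool.false_eq_true, false_iff]
        intro hall
        exact hall p (List.mem_cons_self ..) (by omega) ((PySem.Int.mod_eq_zero_iff_dvd x p).1 hdvd)
      · have hne : (PySem.Int.mod x p == 0) = false := by simpa using hdvd
        rw [hne, if_neg (by simp)]
        rw [ih (fun q hq => h2 q (List.mem_cons_of_mem _ hq)) (List.pairwise_cons.1 hs).2]
        constructor
        · intro h q hq hle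
          rcases List.mem_cons.1 hq with h' | h'
          · subst h'; exact fun hd => hdvd ((PySem.Int.mod_eq_zero_iff_dvd x q).2 hd)
          · exact h q h' hle
        · intro h q hq hle
          exact h q (List.mem_cons_of_mem _ hq) hle

-- B's per-value test against the sieved primes decides primality for x ≤ m
theorem pvIsPrimeSmall_iff (m limit : Int) (hml : m < limit * limit) (hl2 : 2 ≤ limit)
    (P : List Int) (hP : ∀ p, p ∈ P ↔ 2 ≤ p ∧ p < limit ∧ Nat.Prime p.toNat)
    (hPlt : P.Pairwise (· < ·)) (x : Int) (hx : x ≤ m) :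
    pvIsPrimeSmall P x = true ↔ 2 ≤ x ∧ Nat.Prime x.toNat := by
  unfold pvIsPrimeSmall
  by_cases h : x < 2
  · simp only [h, if_true, Bool.false_eq_true, false_iff, not_and]
    omega
  · rw [if_neg h, not_lt] at *
    rw [pvCheckPrimes_iff x P (fun p hp => ((hP p).1 hp).1) hPlt]
    constructor
    · intro hall
      refine ⟨h, ?_⟩
      by_contra hnp
      set p0 := x.toNat.minFac with hp0
      have hpr := Nat.minFac_prime (show x.toNat ≠ 1 by omega)
      have hdp : p0 ∣ x.toNat := Nat.minFac_dvd _
      have hsq : p0 ^ 2 ≤ x.toNat := Nat.minFac_sq_le_self (by omega) hnp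
      have h2p : 2 ≤ p0 := hpr.two_le
      have hsqI : (p0 : Int) * (p0 : Int) ≤ x := by
        have : p0 * p0 ≤ x.toNat := by nlinarith [hsq]
        have h' : ((p0 * p0 : Nat) : Int) ≤ ((x.toNat : Nat) : Int) := by exact_mod_cast this
        push_cast at h'
        omega
      have hplim : (p0 : Int) < limit := by nlinarith [hsqI, h2p]
      have hmem : (p0 : Int) ∈ P := (hP _).2 ⟨by exact_mod_cast h2p, hplim, by rw [Int.toNat_natCast]; exact hpr⟩
      refine hall (p0 : Int) hmem hsqI ?_
      have : ((x.toNat : Nat) : Int) = x := by omega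
      rw [← this]
      exact_mod_cast hdp
    · rintro ⟨-, hp⟩ p hpm hsq hd
      obtain ⟨h2p, -, hppr⟩ := (hP p).1 hpm
      have hdN : p.toNat ∣ x.toNat := by
        have hx0 : x = (x.toNat : Int) := by omega
        have hp0 : p = (p.toNat : Int) := by omega
        rw [hx0, hp0] at hd
        exact_mod_cast hd
      rcases hp.eq_one_or_self_of_dvd p.toNat hdN with h1 | h1
      · omega
      · have : p = x := by omega
        subst this
        nlinarith [hsq]

-- stable sort by the identity key of two nodup lists with the same elements agree
theorem sorted_eq_sorted_of_perm (X Y : List Int) (h : X.Perm Y) (hY : Y.Nodup) :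
    PySem.List.sorted X (fun x => x) false = PySem.List.sorted Y (fun x => x) false := by
  have hZY : (PySem.List.sorted Y (fun x => x) false).Perm Y := PySem.List.sorted_perm ..
  have hZnd : (PySem.List.sorted Y (fun x => x) false).Nodup := hZY.nodup_iff.2 hY
  have hZle : (PySem.List.sorted Y (fun x => x) false).Pairwise (fun a b => a ≤ b) :=
    PySem.List.sorted_pairwise ..
  have hZlt : (PySem.List.sorted Y (fun x => x) false).Pairwise (fun a b => a < b) :=
    (hZnd.and hZle).imp (fun hab => lt_of_le_of_ne hab.2 hab.1)
  exact PySem.List.sorted_eq_of_perm_of_pairwise_lt X _ _ (hZY.trans h.symm) hZlt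

-- ===== VERDICT (by name: the statement is the Claim_ definition above) =====
theorem remove_duplicates_and_sort_spec : Claim_equal_remove_duplicates_and_sort := by
  intro nums _
  unfold Spec_remove_duplicates_and_sort remove_duplicates_and_sort remove_duplicates_and_sort_alt
  cases hmax : PySem.List.max? nums (fun x => x) with
  | none =>
    have hnil : nums = [] := (PySem.List.max?_eq_none_iff nums (fun x => x)).1 hmax
    subst hnil
    rfl
  | some m =>
    dsimp only
    by_cases hm : m < 2
    · rw [if_pos hm]
      have hfil : nums.filter pvIsPrime = [] := List.filter_eq_nil_iff.2 (fun x hx hv => by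
        have hxm := PySem.List.max?_isMax hmax x hx
        have := (pvIsPrime_iff x).1 hv
        omega)
      rw [hfil]
      rfl
    · rw [if_neg hm]
      rw [not_lt] at hm
      obtain ⟨h1L, hmL, hpL⟩ := pvFindLimit_spec m 1 le_rfl (by omega)
      have h2L : 2 ≤ pvFindLimit m 1 := by
        rcases lt_or_ge (pvFindLimit m 1) 2 with h | h
        · have he : pvFindLimit m 1 = 1 := by omega
          rw [he] at hmL
          omega
        · exact h
      set L := pvFindLimit m 1 with hLdef
      set sieve := (PySem.List.pyRange 2 L 1).foldl (fun s i => pvMark s L i)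
        (pvSetA (pvSetA (Array.replicate L.toNat true) 0 false) 1 false) with hsievedef
      set primes := (PySem.List.pyRange 2 L 1).filter (fun i => pvGetA sieve i) with hprimesdef
      have hPchar : ∀ p, p ∈ primes ↔ 2 ≤ p ∧ p < L ∧ Nat.Prime p.toNat := by
        intro p
        rw [hprimesdef, List.mem_filter, PySem.List.mem_pyRange_one]
        constructor
        · rintro ⟨⟨h2p, hpL'⟩, hg⟩
          rw [pvGetA] at hg
          have hcast : ((p.toNat : Nat) : Int) = p := by omega
          have := (sieve_getD_iff L h2L p.toNat (by omega)).1 (by rw [hsievedef] at hg; exact hg)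
          exact ⟨h2p, hpL', this.2⟩
        · rintro ⟨h2p, hpL', hpr⟩
          refine ⟨⟨h2p, hpL'⟩, ?_⟩
          rw [pvGetA, hsievedef]
          exact (sieve_getD_iff L h2L p.toNat (by omega)).2 ⟨by omega, hpr⟩
      have hPlt : primes.Pairwise (· < ·) :=
        List.Pairwise.sublist List.filter_sublist (pyRange_one_pairwise_lt 2 L)
      have hpred : ∀ x ∈ nums, pvIsPrimeSmall primes x = pvIsPrime x := by
        intro x hx
        have hxm : x ≤ m := PySem.List.max?_isMax hmax x hx
        rw [Bool.eq_iff_iff, pvIsPrimeSmall_iff m L hmL h2L primes hPchar hPlt x hxm,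
          pvIsPrime_iff]
      refine sorted_eq_sorted_of_perm _ _ ?_ (List.Nodup.filter _ (PySem.Set.nodup_ofList _))
      rw [List.perm_ext_iff_of_nodup (PySem.Set.nodup_ofList _)
        (List.Nodup.filter _ (PySem.Set.nodup_ofList _))]
      intro a
      rw [PySem.Set.mem_ofList, List.mem_filter, List.mem_filter, PySem.Set.mem_ofList]
      constructor
      · rintro ⟨ha, hp⟩
        exact ⟨ha, by rw [hpred a ha]; exact hp⟩
      · rintro ⟨ha, hp⟩
        exact ⟨ha, by rw [← hpred a ha]; exact hp⟩
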